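-- pv_equiv track=rewrite | github.com/aitalents/computer-vision-technology | Topic 2. Object detection and Semantic Segmentation/creare_track.py | check_track
-- ===== SOURCE A (Python) =====
-- width = 1000
--
-- height = 800
--
-- def check_track(track):
--     if all(el['x'] == track[0]['x'] for el in track):
--         return False
--     if all(el['y'] == track[0]['y'] for el in track):
--         return False
--     if not all(el['x'] >= 0 and el['x'] <= width for el in track):
--         return False
--     if not all(el['y'] >= 0 and el['y'] <= height for el in track):
--         return False
--     if (2 > track[0]['x'] > (width - 2) and 2 > track[0]['y'] > (width - 2)) or (2 > track[-1]['x'] > (width - 2) and 2 > track[-1]['y'] > (width - 2)):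
--         return False
--     return True
-- ===== SOURCE B (Python) =====
-- width = 1000
--
-- height = 800
--
-- def check_track(track):
--     # Single pass: track variation and range in one loop.
--     # (A's final track[0]/track[-1] condition `2 > v > 998` is unsatisfiable, so it is omitted.)
--     if not track:
--         return False
--     x0 = track[0]['x']
--     y0 = track[0]['y']
--     x_varies = False
--     y_varies = False
--     for el in track:
--         x = el['x']
--         y = el['y']
--         if x != x0:
--             x_varies = True
--         if y != y0:
--             y_varies = True
--         if x < 0 or x > width or y < 0 or y > height:
--             return False
--     return x_varies and y_varies
-- ===== Notes on version B (the rewrite author's own statement) =====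
-- stated objective: simpler
-- what changed: Replaces A's four separate full-list generator passes (and its unsatisfiable chained-comparison boundary test, which can never fire) with one loop maintaining variation flags; Pre_ excludes tracks with an element missing an 'x' or 'y' key, where A either raises KeyError or happens to return False early by short-circuit while B raises.
-- outside the precondition, e.g. on check_track([{'x': 9}]): A returns False, B raises KeyError
import Mathlib
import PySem

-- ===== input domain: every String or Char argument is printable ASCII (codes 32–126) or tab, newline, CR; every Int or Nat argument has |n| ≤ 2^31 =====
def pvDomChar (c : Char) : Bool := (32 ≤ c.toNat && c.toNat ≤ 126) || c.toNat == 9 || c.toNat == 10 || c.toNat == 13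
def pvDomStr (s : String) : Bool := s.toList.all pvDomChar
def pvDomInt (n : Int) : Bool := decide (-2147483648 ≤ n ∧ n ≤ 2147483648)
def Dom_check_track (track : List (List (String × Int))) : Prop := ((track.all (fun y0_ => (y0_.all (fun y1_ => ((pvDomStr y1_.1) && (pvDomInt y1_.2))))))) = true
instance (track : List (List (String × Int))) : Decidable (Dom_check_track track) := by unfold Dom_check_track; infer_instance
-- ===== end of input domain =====

-- B merges A's four full-list generator passes into one loop with variation flags and
-- drops A's final unsatisfiable chained-comparison test (2 > v > 998 never holds): simpler, same values.

-- ===== PORT A =====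
-- el['x'] on an assoc-list dict: first matching key (Pre_ guarantees the key is present, so the
-- default 0 is never reached on admitted inputs).
def dget (el : List (String × Int)) (k : String) : Int :=
  (((el.find? (fun p => p.1 == k)).map Prod.snd).getD 0)

def check_track (track : List (List (String × Int))) : Bool :=
  -- track[0] / track[-1] via PySem.List.pyGet? (only reached when track is nonempty, as in Python)
  if track.all (fun el => dget el "x" == dget ((PySem.List.pyGet? track 0).getD []) "x") then false
  else if track.all (fun el => dget el "y" == dget ((PySem.List.pyGet? track 0).getD []) "y") then false
  else if !(track.all (fun el => decide (dget el "x" ≥ 0) && decide (dget el "x" ≤ 1000))) then false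
  else if !(track.all (fun el => decide (dget el "y" ≥ 0) && decide (dget el "y" ≤ 800))) then false
  else if (decide (2 > dget ((PySem.List.pyGet? track 0).getD []) "x") &&
           decide (dget ((PySem.List.pyGet? track 0).getD []) "x" > 1000 - 2) &&
           (decide (2 > dget ((PySem.List.pyGet? track 0).getD []) "y") &&
            decide (dget ((PySem.List.pyGet? track 0).getD []) "y" > 1000 - 2))) ||
          (decide (2 > dget ((PySem.List.pyGet? track (-1)).getD []) "x") &&
           decide (dget ((PySem.List.pyGet? track (-1)).getD []) "x" > 1000 - 2) &&
           (decide (2 > dget ((PySem.List.pyGet? track (-1)).getD []) "y") &&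
            decide (dget ((PySem.List.pyGet? track (-1)).getD []) "y" > 1000 - 2))) then false
  else true

-- ===== PORT B =====
def bLoop (x0 y0 : Int) (xv yv : Bool) : List (List (String × Int)) → Bool
  | [] => xv && yv
  | el :: rest =>
    let x := dget el "x"
    let y := dget el "y"
    let xv' := if x != x0 then true else xv
    let yv' := if y != y0 then true else yv
    if decide (x < 0) || decide (x > 1000) || decide (y < 0) || decide (y > 800) then false
    else bLoop x0 y0 xv' yv' rest

def check_track_alt (track : List (List (String × Int))) : Bool :=
  match track with
  | [] => false
  | el0 :: _ => bLoop (dget el0 "x") (dget el0 "y") false false track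

-- ===== PRECONDITION & SPEC =====
-- Pre_ excludes tracks with an element missing an 'x' or 'y' key: there A either raises KeyError or
-- happens to return False early by short-circuit, while B raises KeyError.
def Pre_check_track (track : List (List (String × Int))) : Prop :=
  ∀ el ∈ track, (el.any (fun p => p.1 == "x")) = true ∧ (el.any (fun p => p.1 == "y")) = true
instance (track : List (List (String × Int))) : Decidable (Pre_check_track track) := by
  unfold Pre_check_track; infer_instance

def pvWitness_check_track : (List (List (String × Int))) :=
  [[("x", 0), ("y", 0)], [("x", 5), ("y", 5)]]

def Spec_check_track (track : List (List (String × Int))) (out : Bool) : Prop := out = check_track_alt track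
instance (track : List (List (String × Int))) (out : Bool) : Decidable (Spec_check_track track out) := by unfold Spec_check_track; infer_instance

-- ===== CLAIM (what is proved, stated in full; the proofs are below) =====
def Claim_equal_check_track : Prop := ∀ (track : List (List (String × Int))), Dom_check_track track → Pre_check_track track → Spec_check_track track (check_track track)

-- ===== LEMMAS AND PROOFS =====

-- the chained comparison 2 > a > 998 is unsatisfiable
lemma final_pt (a b : Int) :
    (decide (2 > a) && decide (a > 1000 - 2) && (decide (2 > b) && decide (b > 1000 - 2))) = false := by
  by_cases h1 : (2:Int) > a <;> by_cases h2 : a > 1000 - 2 <;> simp [h1] <;> omega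

lemma range_pt (x y : Int) :
    (!(decide (x < 0) || decide (x > 1000) || decide (y < 0) || decide (y > 800)))
      = ((decide (x ≥ 0) && decide (x ≤ 1000)) && (decide (y ≥ 0) && decide (y ≤ 800))) := by
  by_cases h1 : x < 0 <;> by_cases h2 : x > 1000 <;> by_cases h3 : y < 0 <;> by_cases h4 : y > 800 <;>
    simp [h1, h2, h3, h4] <;> omega

lemma all_and {α : Type} (p q : α → Bool) (l : List α) :
    (l.all (fun a => p a && q a)) = (l.all p && l.all q) := by
  induction l with
  | nil => rfl
  | cons a t ih =>
    cases hp : p a <;> cases hq : q a <;> simp [hp, hq, ih]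

lemma any_ne_eq_not_all_eq (x0 : Int) (k : String) (xs : List (List (String × Int))) :
    (xs.any (fun el => dget el k != x0)) = !(xs.all (fun el => dget el k == x0)) := by
  induction xs with
  | nil => simp
  | cons el rest ih =>
    rw [List.any_cons, List.all_cons, ih, Bool.not_and]
    rfl

lemma bLoop_eq (x0 y0 : Int) (xv yv : Bool) (xs : List (List (String × Int))) :
    bLoop x0 y0 xv yv xs =
      ((xs.all (fun el => !(decide (dget el "x" < 0) || decide (dget el "x" > 1000) ||
                            decide (dget el "y" < 0) || decide (dget el "y" > 800))))
       && (xv || xs.any (fun el => dget el "x" != x0))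
       && (yv || xs.any (fun el => dget el "y" != y0))) := by
  induction xs generalizing xv yv with
  | nil => simp [bLoop]
  | cons el rest ih =>
    simp only [bLoop, List.all_cons, List.any_cons]
    cases hbig : (decide (dget el "x" < 0) || decide (dget el "x" > 1000) ||
                  decide (dget el "y" < 0) || decide (dget el "y" > 800)) with
    | true => simp
    | false =>
      simp only [Bool.not_false, Bool.true_and, ih]
      cases hx : (dget el "x" != x0) <;> cases hy : (dget el "y" != y0) <;>
        simp [Bool.or_comm, Bool.or_left_comm, Bool.and_comm, Bool.and_left_comm]

lemma pyGet_zero_cons (el0 : List (String × Int)) (rest : List (List (String × Int))) :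
    ((PySem.List.pyGet? (el0 :: rest) 0).getD []) = el0 := by
  simp [PySem.List.pyGet?, PySem.List.pyIdx?]

theorem check_track_eq_alt (track : List (List (String × Int))) :
    check_track track = check_track_alt track := by
  cases track with
  | nil => rfl
  | cons el0 rest =>
    have hB : check_track_alt (el0 :: rest)
        = bLoop (dget el0 "x") (dget el0 "y") false false (el0 :: rest) := rfl
    rw [hB, bLoop_eq, Bool.false_or, Bool.false_or]
    rw [show (fun el => !(decide (dget el "x" < 0) || decide (dget el "x" > 1000) ||
                          decide (dget el "y" < 0) || decide (dget el "y" > 800)))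
          = (fun el => (decide (dget el "x" ≥ 0) && decide (dget el "x" ≤ 1000)) &&
                       (decide (dget el "y" ≥ 0) && decide (dget el "y" ≤ 800)))
        from funext (fun el => range_pt _ _)]
    rw [all_and, any_ne_eq_not_all_eq, any_ne_eq_not_all_eq]
    unfold check_track
    rw [pyGet_zero_cons, final_pt, final_pt]
    cases h1 : ((el0 :: rest).all (fun el => dget el "x" == dget el0 "x")) <;>
      cases h2 : ((el0 :: rest).all (fun el => dget el "y" == dget el0 "y")) <;>
      cases h3 : ((el0 :: rest).all (fun el => decide (dget el "x" ≥ 0) && decide (dget el "x" ≤ 1000))) <;>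
      cases h4 : ((el0 :: rest).all (fun el => decide (dget el "y" ≥ 0) && decide (dget el "y" ≤ 800))) <;>
      simp

-- ===== VERDICT (by name: the statement is the Claim_ definition above) =====
theorem check_track_spec : Claim_equal_check_track := by
  intro track _ _
  show check_track track = check_track_alt track
  exact check_track_eq_alt track
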